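-- pv_equiv track=rewrite | github.com/Crude-005/CompetitiveProgramming | CodeForces/contest6/PrblmD.py | fn
-- ===== SOURCE A (Python) =====
-- def fn(arr1,n,dis,dir):
--     arr2 = [0,]*n
--     if dir == '?':
--         for i in range(n):
--             if arr1[i]:
--                 arr2[(i+int(dis))%n] = 1
--                 arr2[(i-int(dis))%n] = 1
--     elif dir == '0':
--         for i in range(n):
--             if arr1[i]:
--                 arr2[(i+int(dis))%n] = 1
--     else:
--         for i in range(n):
--             if arr1[i]:
--                 arr2[(i-int(dis))%n] = 1
--     return arr2
-- ===== SOURCE B (Python) =====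
-- def fn(arr1, n, dis, dir):
--     d = int(dis)
--     if dir == '?':
--         return [1 if arr1[(j - d) % n] or arr1[(j + d) % n] else 0 for j in range(n)]
--     if dir == '0':
--         return [1 if arr1[(j - d) % n] else 0 for j in range(n)]
--     return [1 if arr1[(j + d) % n] else 0 for j in range(n)]
-- ===== Notes on version B (the rewrite author's own statement) =====
-- stated objective: alternative
-- what changed: Replaced A's push loops (mutating a zero array at shifted target indices) by a pull comprehension that computes each output cell directly from its circular source position(s).
import Mathlib
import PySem

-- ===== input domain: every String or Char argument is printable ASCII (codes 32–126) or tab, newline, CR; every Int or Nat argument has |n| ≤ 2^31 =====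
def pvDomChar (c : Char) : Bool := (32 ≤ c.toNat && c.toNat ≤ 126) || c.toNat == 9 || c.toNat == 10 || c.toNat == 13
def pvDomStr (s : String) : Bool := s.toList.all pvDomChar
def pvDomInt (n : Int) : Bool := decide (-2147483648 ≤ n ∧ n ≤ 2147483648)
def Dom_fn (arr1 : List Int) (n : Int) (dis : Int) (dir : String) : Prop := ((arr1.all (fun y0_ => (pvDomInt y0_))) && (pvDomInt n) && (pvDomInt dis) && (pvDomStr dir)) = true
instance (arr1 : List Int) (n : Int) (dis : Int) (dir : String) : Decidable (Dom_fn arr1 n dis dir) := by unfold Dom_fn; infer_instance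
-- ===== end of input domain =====

-- B replaces A's push loops (writing 1 at shifted targets of a zero array) by a pull
-- comprehension computing each output cell from its circular source position(s); alternative
-- decomposition, same cost.

-- ===== PORT A =====
-- literal port of A: arr2 = [0]*n; push loops mutate arr2 via List.set.
-- arr1[i] is pyGetD (default 0): exact on Pre_fn, where Python's indexing does not raise.
def fn (arr1 : List Int) (n : Int) (dis : Int) (dir : String) : List Int :=
  let arr2 : List Int := List.replicate n.toNat 0
  if dir == "?" then
    (PySem.List.pyRange 0 n 1).foldl (fun a2 i =>
      if PySem.List.pyGetD arr1 i 0 ≠ 0 then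
        (a2.set (PySem.Int.mod (i + dis) n).toNat 1).set (PySem.Int.mod (i - dis) n).toNat 1
      else a2) arr2
  else if dir == "0" then
    (PySem.List.pyRange 0 n 1).foldl (fun a2 i =>
      if PySem.List.pyGetD arr1 i 0 ≠ 0 then
        a2.set (PySem.Int.mod (i + dis) n).toNat 1
      else a2) arr2
  else
    (PySem.List.pyRange 0 n 1).foldl (fun a2 i =>
      if PySem.List.pyGetD arr1 i 0 ≠ 0 then
        a2.set (PySem.Int.mod (i - dis) n).toNat 1
      else a2) arr2

-- ===== PORT B =====
-- literal port of Source B: one comprehension per direction, pulling from the source index.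
def fn_alt (arr1 : List Int) (n : Int) (dis : Int) (dir : String) : List Int :=
  if dir == "?" then
    (PySem.List.pyRange 0 n 1).map (fun j =>
      if PySem.List.pyGetD arr1 (PySem.Int.mod (j - dis) n) 0 ≠ 0 ∨
         PySem.List.pyGetD arr1 (PySem.Int.mod (j + dis) n) 0 ≠ 0 then 1 else 0)
  else if dir == "0" then
    (PySem.List.pyRange 0 n 1).map (fun j =>
      if PySem.List.pyGetD arr1 (PySem.Int.mod (j - dis) n) 0 ≠ 0 then 1 else 0)
  else
    (PySem.List.pyRange 0 n 1).map (fun j =>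
      if PySem.List.pyGetD arr1 (PySem.Int.mod (j + dis) n) 0 ≠ 0 then 1 else 0)

-- ===== PRECONDITION & SPEC =====
-- Pre_fn = exactly the inputs where Python A returns: indexing arr1[i] for i in range(n)
-- raises IndexError iff n > len(arr1) (B raises on the same inputs).
def Pre_fn (arr1 : List Int) (n : Int) (dis : Int) (dir : String) : Prop :=
  n ≤ (arr1.length : Int)
instance (arr1 : List Int) (n : Int) (dis : Int) (dir : String) : Decidable (Pre_fn arr1 n dis dir) := by unfold Pre_fn; infer_instance
def pvWitness_fn : List Int × Int × Int × String := ([1, 0, 1], 3, 1, "0")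

def Spec_fn (arr1 : List Int) (n : Int) (dis : Int) (dir : String) (out : List Int) : Prop := out = fn_alt arr1 n dis dir
instance (arr1 : List Int) (n : Int) (dis : Int) (dir : String) (out : List Int) : Decidable (Spec_fn arr1 n dis dir out) := by unfold Spec_fn; infer_instance

-- ===== CLAIM (what is proved, stated in full; the proofs are below) =====
def Claim_equal_fn : Prop := ∀ (arr1 : List Int) (n : Int) (dis : Int) (dir : String), Dom_fn arr1 n dis dir → Pre_fn arr1 n dis dir → Spec_fn arr1 n dis dir (fn arr1 n dis dir)

-- ===== LEMMAS AND PROOFS =====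

-- set then read at an in-range position
lemma set_get?_of_lt (acc : List Int) (k j : Nat) (v : Int) (hj : j < acc.length) :
    (acc.set k v)[j]? = if k = j then some v else acc[j]? := by
  rw [List.getElem?_set]
  by_cases h : k = j
  · subst h; simp [hj]
  · simp [h]

-- cellwise value of the single-set push loop
lemma setLoop1_get? (p : Int → Prop) [DecidablePred p] (t : Int → Nat)
    (is : List Int) (acc : List Int) (j : Nat) :
    (is.foldl (fun a2 i => if p i then a2.set (t i) (1:Int) else a2) acc)[j]? =
      if (∃ i ∈ is, p i ∧ t i = j) ∧ j < acc.length then some 1 else acc[j]? := by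
  induction is generalizing acc with
  | nil => simp
  | cons i is ih =>
    simp only [List.foldl_cons]
    rw [ih]
    by_cases hp : p i
    · simp only [hp, if_true, List.length_set]
      by_cases hj : j < acc.length
      · rw [set_get?_of_lt acc (t i) j 1 hj]
        by_cases hex : ∃ x ∈ is, p x ∧ t x = j
        · simp [hex, hj, hp]
        · by_cases htj : t i = j <;> simp [hex, hj, htj, hp]
      · have h1 : (acc.set (t i) 1)[j]? = none := List.getElem?_eq_none (by simp; omega)
        have h2 : acc[j]? = none := List.getElem?_eq_none (by omega)
        simp [hj, h1, h2]
    · have hiff : (∃ x ∈ i :: is, p x ∧ t x = j) ↔ (∃ x ∈ is, p x ∧ t x = j) := by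
        constructor
        · rintro ⟨x, hx, hpx, htx⟩
          rcases List.mem_cons.mp hx with h | h
          · exact absurd (h ▸ hpx) hp
          · exact ⟨x, h, hpx, htx⟩
        · rintro ⟨x, hx, hpx, htx⟩
          exact ⟨x, List.mem_cons_of_mem _ hx, hpx, htx⟩
      simp only [hp, if_false, hiff]

-- cellwise value of the double-set push loop
lemma setLoop2_get? (p : Int → Prop) [DecidablePred p] (t1 t2 : Int → Nat)
    (is : List Int) (acc : List Int) (j : Nat) :
    (is.foldl (fun a2 i => if p i then (a2.set (t1 i) (1:Int)).set (t2 i) 1 else a2) acc)[j]? =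
      if (∃ i ∈ is, p i ∧ (t1 i = j ∨ t2 i = j)) ∧ j < acc.length then some 1 else acc[j]? := by
  induction is generalizing acc with
  | nil => simp
  | cons i is ih =>
    simp only [List.foldl_cons]
    rw [ih]
    by_cases hp : p i
    · simp only [hp, if_true, List.length_set]
      by_cases hj : j < acc.length
      · rw [set_get?_of_lt (acc.set (t1 i) 1) (t2 i) j 1 (by simpa using hj),
            set_get?_of_lt acc (t1 i) j 1 hj]
        by_cases hex : ∃ x ∈ is, p x ∧ (t1 x = j ∨ t2 x = j)
        · simp [hex, hj, hp]
        · by_cases h1 : t1 i = j <;> by_cases h2 : t2 i = j <;>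
            simp [hex, hj, h1, h2, hp]
      · have h1 : ((acc.set (t1 i) 1).set (t2 i) 1)[j]? = none :=
          List.getElem?_eq_none (by simp; omega)
        have h2 : acc[j]? = none := List.getElem?_eq_none (by omega)
        simp [hj, h1, h2]
    · have hiff : (∃ x ∈ i :: is, p x ∧ (t1 x = j ∨ t2 x = j)) ↔
          (∃ x ∈ is, p x ∧ (t1 x = j ∨ t2 x = j)) := by
        constructor
        · rintro ⟨x, hx, hpx, htx⟩
          rcases List.mem_cons.mp hx with h | h
          · exact absurd (h ▸ hpx) hp
          · exact ⟨x, h, hpx, htx⟩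
        · rintro ⟨x, hx, hpx, htx⟩
          exact ⟨x, List.mem_cons_of_mem _ hx, hpx, htx⟩
      simp only [hp, if_false, hiff]

-- mod arithmetic: inverting a circular shift
lemma mod_shift_inv {n s i j : Int} (hn : 0 < n) (hi0 : 0 ≤ i) (hin : i < n)
    (h : (i + s) % n = j) : (j - s) % n = i := by
  have hd := Int.emod_def (i + s) n
  set q := (i + s) / n with hq
  have hj : j - s = i - n * q := by omega
  rw [hj]
  have : (i - n * q) % n = i % n := by
    have := Int.sub_mul_emod_self_left (a := i) (b := n) (c := q)
    simpa using this
  rw [this, Int.emod_eq_of_lt hi0 hin]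

lemma mod_shift_fwd {n s j : Int} (hn : 0 < n) (hj0 : 0 ≤ j) (hjn : j < n) :
    ((j - s) % n + s) % n = j := by
  have hd := Int.emod_def (j - s) n
  set q := (j - s) / n with hq
  have h1 : (j - s) % n + s = j - n * q := by omega
  rw [h1]
  have : (j - n * q) % n = j % n := by
    have := Int.sub_mul_emod_self_left (a := j) (b := n) (c := q)
    simpa using this
  rw [this, Int.emod_eq_of_lt hj0 hjn]

-- the push existence condition equals the pull condition (single direction, shift s)
lemma key_shift (p : Int → Prop) [DecidablePred p] {n : Int} (hn : 0 < n)
    {j : Nat} (hjn : (j : Int) < n) (s : Int) :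
    ((∃ i ∈ PySem.List.pyRange 0 n 1, p i ∧ (PySem.Int.mod (i + s) n).toNat = j) ↔
      p (PySem.Int.mod ((j : Int) - s) n)) := by
  have hmod : ∀ a : Int, PySem.Int.mod a n = a % n := fun a =>
    PySem.Int.mod_eq_emod_of_pos hn
  constructor
  · rintro ⟨i, hmem, hpi, htj⟩
    rw [PySem.List.mem_pyRange_one] at hmem
    have hnn : 0 ≤ (i + s) % n := Int.emod_nonneg _ (by omega)
    have hij : (i + s) % n = (j : Int) := by
      rw [hmod] at htj; omega
    have := mod_shift_inv hn hmem.1 hmem.2 hij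
    rw [hmod]; rw [this]; exact hpi
  · intro hp
    refine ⟨PySem.Int.mod ((j : Int) - s) n, ?_, hp, ?_⟩
    · rw [PySem.List.mem_pyRange_one, hmod]
      exact ⟨Int.emod_nonneg _ (by omega), Int.emod_lt_of_pos _ hn⟩
    · rw [hmod, hmod]
      have := mod_shift_fwd (s := s) hn (by positivity) hjn
      omega

-- getElem? of B's comprehension
lemma map_pyRange_get? (g : Int → Int) (n : Int) (j : Nat) :
    ((PySem.List.pyRange 0 n 1).map g)[j]? =
      if (j : Int) < n then some (g (j : Int)) else none := by
  rw [PySem.List.pyRange_one]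
  by_cases hj : (j : Int) < n
  · have h : j < (n - 0).toNat := by omega
    simp [List.getElem?_map, List.getElem?_range, h, hj]
  · have h : ¬ j < (n - 0).toNat := by omega
    simp [List.getElem?_map, List.getElem?_range, h, hj]

-- one push branch (shift s) equals the corresponding pull comprehension
lemma branch_eq (p : Int → Prop) [DecidablePred p] {n : Int} (hn : 0 < n) (s : Int) :
    (PySem.List.pyRange 0 n 1).foldl
        (fun a2 i => if p i then a2.set (PySem.Int.mod (i + s) n).toNat (1:Int) else a2)
        (List.replicate n.toNat 0)
      = (PySem.List.pyRange 0 n 1).map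
          (fun j => if p (PySem.Int.mod (j - s) n) then (1:Int) else 0) := by
  apply List.ext_getElem?
  intro j
  rw [setLoop1_get? p (fun i => (PySem.Int.mod (i + s) n).toNat), map_pyRange_get?]
  simp only [List.length_replicate]
  by_cases hj : (j : Int) < n
  · have hjm : j < n.toNat := by omega
    rw [List.getElem?_replicate]
    have hkey := key_shift p hn hj s
    simp only [hjm, if_true, hkey]
    split_ifs <;> simp_all
  · have hjm : ¬ j < n.toNat := by omega
    rw [List.getElem?_replicate]
    simp [hjm, hj]

-- the '?' push branch (both shifts) equals the corresponding pull comprehension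
lemma branch_eq2 (p : Int → Prop) [DecidablePred p] {n : Int} (hn : 0 < n) (s : Int) :
    (PySem.List.pyRange 0 n 1).foldl
        (fun a2 i => if p i then
            (a2.set (PySem.Int.mod (i + s) n).toNat (1:Int)).set (PySem.Int.mod (i + -s) n).toNat 1
          else a2)
        (List.replicate n.toNat 0)
      = (PySem.List.pyRange 0 n 1).map
          (fun j => if p (PySem.Int.mod (j - s) n) ∨ p (PySem.Int.mod (j + s) n) then (1:Int) else 0) := by
  apply List.ext_getElem?
  intro j
  rw [setLoop2_get? p (fun i => (PySem.Int.mod (i + s) n).toNat)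
        (fun i => (PySem.Int.mod (i + -s) n).toNat), map_pyRange_get?]
  simp only [List.length_replicate]
  by_cases hj : (j : Int) < n
  · have hjm : j < n.toNat := by omega
    rw [List.getElem?_replicate]
    have hkey1 := key_shift p hn hj s
    have hkey2 := key_shift p hn hj (-s)
    simp only [sub_neg_eq_add] at hkey2
    have hsplit : (∃ i ∈ PySem.List.pyRange 0 n 1, p i ∧
        ((PySem.Int.mod (i + s) n).toNat = j ∨ (PySem.Int.mod (i + -s) n).toNat = j)) ↔
        (p (PySem.Int.mod ((j:Int) - s) n) ∨ p (PySem.Int.mod ((j:Int) + s) n)) := by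
      rw [← hkey1, ← hkey2]
      constructor
      · rintro ⟨i, hm, hp, h1 | h2⟩
        · exact Or.inl ⟨i, hm, hp, h1⟩
        · exact Or.inr ⟨i, hm, hp, h2⟩
      · rintro (⟨i, hm, hp, h1⟩ | ⟨i, hm, hp, h2⟩)
        · exact ⟨i, hm, hp, Or.inl h1⟩
        · exact ⟨i, hm, hp, Or.inr h2⟩
    simp only [hjm, if_true, and_true, hsplit]
    split_ifs <;> simp_all
  · have hjm : ¬ j < n.toNat := by omega
    rw [List.getElem?_replicate]
    simp [hjm, hj]

theorem fn_spec : Claim_equal_fn := by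
  intro arr1 n dis dir _hdom _hpre
  unfold Spec_fn fn fn_alt
  by_cases hn : 0 < n
  case neg =>
    have h1 : PySem.List.pyRange 0 n 1 = [] := PySem.List.pyRange_one_eq_nil (by omega)
    have h2 : n.toNat = 0 := by omega
    simp [h1, h2]
  case pos =>
    split_ifs
    · simp only [sub_eq_add_neg]
      exact branch_eq2 (fun i => PySem.List.pyGetD arr1 i 0 ≠ 0) hn dis
    · exact branch_eq (fun i => PySem.List.pyGetD arr1 i 0 ≠ 0) hn dis
    · simp only [sub_eq_add_neg]
      have := branch_eq (fun i => PySem.List.pyGetD arr1 i 0 ≠ 0) hn (-dis)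
      simpa only [sub_eq_add_neg, neg_neg] using this
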